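-- pv_equiv track=rewrite | github.com/nematirani/backend-internship-resource | python/kata/combine.py | combine_together
-- ===== SOURCE A (Python) =====
-- def combine_together(d1, d2):
--     for i in d2.keys():
--         if i in d1:
--             d2[i] += d1[i]
--     for b in d1.keys():
--         if b not in d2:
--             d2[b] = d1[b]
--     return d2
-- ===== SOURCE B (Python) =====
-- def combine_together(d1, d2):
--     # Single pass over d1 instead of A's two sequential scans; mutates and returns d2 like A.
--     for k, v in d1.items():
--         if k in d2:
--             d2[k] += v
--         else:
--             d2[k] = v
--     return d2
-- ===== Notes on version B (the rewrite author's own statement) =====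
-- stated objective: simpler
-- what changed: A scans d2 (adding d1's values to common keys) and then scans d1 (inserting missing keys); B makes one pass over d1, adding into d2 for existing keys and inserting new ones, so the d2-scan disappears.
import Mathlib
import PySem

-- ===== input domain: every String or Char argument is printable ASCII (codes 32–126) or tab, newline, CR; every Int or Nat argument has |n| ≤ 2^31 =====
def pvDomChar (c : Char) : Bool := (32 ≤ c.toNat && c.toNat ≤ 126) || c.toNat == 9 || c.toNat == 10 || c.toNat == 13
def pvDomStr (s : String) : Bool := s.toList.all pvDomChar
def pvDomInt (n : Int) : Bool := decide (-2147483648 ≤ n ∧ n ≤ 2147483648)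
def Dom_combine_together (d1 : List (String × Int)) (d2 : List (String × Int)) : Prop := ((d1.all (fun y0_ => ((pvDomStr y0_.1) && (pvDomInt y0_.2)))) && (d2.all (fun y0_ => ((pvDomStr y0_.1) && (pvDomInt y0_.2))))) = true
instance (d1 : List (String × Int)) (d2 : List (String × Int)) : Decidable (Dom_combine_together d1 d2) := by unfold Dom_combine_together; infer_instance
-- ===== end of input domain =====

-- B replaces A's two sequential scans (add d1's values into d2's common keys, then insert d1's
-- missing keys) by a single pass over d1; in Python both mutate and return the same d2 object.

-- ===== PORT A =====
def combine_together (d1 : List (String × Int)) (d2 : List (String × Int)) : List (String × Int) :=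
  let D1 : PySem.Dict String Int := PySem.Dict.ofList d1
  let D2 : PySem.Dict String Int := PySem.Dict.ofList d2
  -- for i in d2.keys(): if i in d1: d2[i] += d1[i]
  let p1 := D2.keys.foldl (fun d i => if D1.contains i then d.modify i 0 (· + D1.getD i 0) else d) D2
  -- for b in d1.keys(): if b not in d2: d2[b] = d1[b]
  let p2 := D1.keys.foldl (fun d b => if d.contains b then d else d.insert b (D1.getD b 0)) p1
  p2.items

-- ===== PORT B =====
def combine_together_alt (d1 : List (String × Int)) (d2 : List (String × Int)) : List (String × Int) :=
  let D1 : PySem.Dict String Int := PySem.Dict.ofList d1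
  -- for k, v in d1.items(): if k in d2: d2[k] += v else: d2[k] = v
  let r := D1.items.foldl
    (fun d p => if d.contains p.1 then d.modify p.1 0 (· + p.2) else d.insert p.1 p.2)
    (PySem.Dict.ofList d2)
  r.items

-- ===== PRECONDITION & SPEC =====
def Spec_combine_together (d1 : List (String × Int)) (d2 : List (String × Int)) (out : List (String × Int)) : Prop := out = combine_together_alt d1 d2
instance (d1 : List (String × Int)) (d2 : List (String × Int)) (out : List (String × Int)) : Decidable (Spec_combine_together d1 d2 out) := by unfold Spec_combine_together; infer_instance

-- ===== CLAIM (what is proved, stated in full; the proofs are below) =====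
def Claim_equal_combine_together : Prop := ∀ (d1 : List (String × Int)) (d2 : List (String × Int)), Dom_combine_together d1 d2 → Spec_combine_together d1 d2 (combine_together d1 d2)

-- ===== LEMMAS AND PROOFS =====

-- A's first loop only modifies keys already present, so the key list is unchanged.
theorem keys_loop1 (c : String → Bool) (f : String → Int → Int) (l : List String) :
    ∀ d : PySem.Dict String Int, (∀ i ∈ l, i ∈ d.keys) →
    (l.foldl (fun d i => if c i then d.modify i 0 (f i) else d) d).keys = d.keys := by
  induction l with
  | nil => intro d _; rfl
  | cons i rest ih =>
      intro d hmem
      simp only [List.foldl_cons]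
      by_cases hci : c i = true
      · rw [if_pos hci]
        have hcont : d.contains i = true := by
          rw [PySem.Dict.contains_eq_decide_mem_keys]
          simp [hmem i (List.mem_cons_self)]
        have hkm : (d.modify i 0 (f i)).keys = d.keys := by
          rw [PySem.Dict.keys_modify, PySem.Dict.keys_insert_of_contains _ _ hcont]
        rw [ih _ (by intro x hx; rw [hkm]; exact hmem x (List.mem_cons_of_mem _ hx)), hkm]
      · rw [if_neg hci]
        exact ih d (fun x hx => hmem x (List.mem_cons_of_mem _ hx))

-- Value of A's first loop at any key.
theorem getD_loop1 (c : String → Bool) (f : String → Int → Int) (l : List String)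
    (k : String) (hnd : l.Nodup) :
    ∀ d : PySem.Dict String Int,
    (l.foldl (fun d i => if c i then d.modify i 0 (f i) else d) d).getD k 0 =
      if k ∈ l ∧ c k = true then f k (d.getD k 0) else d.getD k 0 := by
  induction l with
  | nil => intro d; simp
  | cons i rest ih =>
      have hnr : rest.Nodup := hnd.of_cons
      have hni : i ∉ rest := (List.nodup_cons.mp hnd).1
      intro d
      simp only [List.foldl_cons]
      by_cases hci : c i = true
      · rw [if_pos hci, ih hnr, PySem.Dict.getD_modify]
        by_cases hk : k = i
        · subst hk; simp [hni, hci]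
        · simp [hk, List.mem_cons]
      · rw [if_neg hci, ih hnr]
        by_cases hk : k = i
        · subst hk; simp [hni, hci]
        · simp [hk, List.mem_cons]

-- A's second loop (conditional inserts) appends exactly the fresh keys of l.
theorem keys_loop2 (g : String → Int) (l : List String) (hnd : l.Nodup) :
    ∀ d : PySem.Dict String Int,
    (l.foldl (fun d b => if d.contains b then d else d.insert b (g b)) d).keys =
      d.keys ++ l.filter (fun b => !(d.contains b)) := by
  induction l with
  | nil => intro d; simp
  | cons b rest ih =>
      have hnr : rest.Nodup := hnd.of_cons
      have hnb : b ∉ rest := (List.nodup_cons.mp hnd).1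
      intro d
      simp only [List.foldl_cons]
      by_cases h : d.contains b = true
      · rw [if_pos h, ih hnr]
        simp [h]
      · rw [if_neg h, ih hnr]
        have hb : d.contains b = false := by simpa using h
        have hkeys : (d.insert b (g b)).keys = d.keys ++ [b] :=
          PySem.Dict.keys_insert_of_not_contains _ _ hb
        have hfil : rest.filter (fun x => !((d.insert b (g b)).contains x)) =
            rest.filter (fun x => !(d.contains x)) := by
          apply List.filter_congr
          intro x hx
          have hxb : x ≠ b := fun he => hnb (he ▸ hx)
          simp [PySem.Dict.contains_insert, hxb]
        rw [hkeys, hfil]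
        simp [hb]

-- Value of A's second loop at any key.
theorem getD_loop2 (g : String → Int) (l : List String) (k : String) (hnd : l.Nodup) :
    ∀ d : PySem.Dict String Int,
    (l.foldl (fun d b => if d.contains b then d else d.insert b (g b)) d).getD k 0 =
      if k ∈ l ∧ d.contains k = false then g k else d.getD k 0 := by
  induction l with
  | nil => intro d; simp
  | cons b rest ih =>
      have hnr : rest.Nodup := hnd.of_cons
      have hnb : b ∉ rest := (List.nodup_cons.mp hnd).1
      intro d
      simp only [List.foldl_cons]
      by_cases h : d.contains b = true
      · rw [if_pos h, ih hnr]
        by_cases hk : k = b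
        · subst hk; simp [h, hnb]
        · simp [List.mem_cons, hk]
      · rw [if_neg h, ih hnr]
        have hb : d.contains b = false := by simpa using h
        by_cases hk : k = b
        · subst hk
          simp [hnb, hb, PySem.Dict.getD_insert_self]
        · have hc : (d.insert b (g b)).contains k = d.contains k := by
            simp [PySem.Dict.contains_insert, hk]
          have hg : (d.insert b (g b)).getD k 0 = d.getD k 0 :=
            PySem.Dict.getD_insert_of_ne _ _ _ hk
          rw [hc, hg]
          simp [List.mem_cons, hk]

-- B's single loop adds, at every key, the value the pair list carries for it.
theorem getD_loopB (ps : List (String × Int)) (k : String)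
    (hnd : (ps.map Prod.fst).Nodup) :
    ∀ d : PySem.Dict String Int,
    (ps.foldl (fun d p => if d.contains p.1 then d.modify p.1 0 (· + p.2) else d.insert p.1 p.2) d).getD k 0 =
      d.getD k 0 + (PySem.Dict.mk ps).getD k 0 := by
  induction ps with
  | nil =>
      intro d
      simp [PySem.Dict.getD_eq_get?_getD, PySem.Dict.get?]
  | cons p rest ih =>
      have hnr : (rest.map Prod.fst).Nodup := (List.nodup_cons.mp (by simpa using hnd)).2
      have hnb : p.1 ∉ rest.map Prod.fst := (List.nodup_cons.mp (by simpa using hnd)).1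
      intro d
      simp only [List.foldl_cons]
      have hmk : (PySem.Dict.mk (p :: rest)).getD k 0 =
          if p.1 == k then p.2 else (PySem.Dict.mk rest).getD k 0 := by
        rw [PySem.Dict.getD_eq_get?_getD, PySem.Dict.get?_mk_cons]
        split_ifs <;> simp [PySem.Dict.getD_eq_get?_getD]
      by_cases hk : k = p.1
      · have hbeq : (p.1 == k) = true := by simp [hk]
        have hrest0 : (PySem.Dict.mk rest).getD k 0 = 0 := by
          apply PySem.Dict.getD_of_not_contains
          rw [PySem.Dict.contains_mk, List.any_eq_false]
          intro q hq
          simp only [beq_iff_eq]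
          exact fun hqe => hnb (List.mem_map.mpr ⟨q, hq, hqe.trans hk⟩)
        rw [ih hnr, hmk, hbeq, if_pos rfl, hrest0]
        by_cases h : d.contains p.1 = true
        · rw [if_pos h, hk, PySem.Dict.getD_modify_self]
          simp
        · have hb : d.contains p.1 = false := by simpa using h
          rw [if_neg h, hk, PySem.Dict.getD_insert_self, PySem.Dict.getD_of_not_contains _ _ hb]
          simp
      · rw [ih hnr, hmk]
        have hne : (p.1 == k) = false := by simpa using Ne.symm hk
        rw [hne]
        by_cases h : d.contains p.1 = true
        · rw [if_pos h, PySem.Dict.getD_modify_of_ne _ _ _ hk]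
          simp
        · rw [if_neg h, PySem.Dict.getD_insert_of_ne _ _ _ hk]
          simp

-- Keys produced by B's loop: d2's keys, then d1's fresh keys in order.
theorem keys_loopB (ps : List (String × Int)) (hnd : (ps.map Prod.fst).Nodup) :
    ∀ d : PySem.Dict String Int,
    (ps.foldl (fun d p => if d.contains p.1 then d.modify p.1 0 (· + p.2) else d.insert p.1 p.2) d).keys =
      d.keys ++ (ps.map Prod.fst).filter (fun b => !(d.contains b)) := by
  induction ps with
  | nil => intro d; simp
  | cons p rest ih =>
      have hnr : (rest.map Prod.fst).Nodup := (List.nodup_cons.mp (by simpa using hnd)).2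
      have hnb : p.1 ∉ rest.map Prod.fst := (List.nodup_cons.mp (by simpa using hnd)).1
      intro d
      simp only [List.foldl_cons, List.map_cons]
      by_cases h : d.contains p.1 = true
      · rw [if_pos h, ih hnr]
        have hkm : (d.modify p.1 0 (· + p.2)).keys = d.keys := by
          rw [PySem.Dict.keys_modify, PySem.Dict.keys_insert_of_contains _ _ h]
        have hfil : (rest.map Prod.fst).filter (fun b => !((d.modify p.1 0 (· + p.2)).contains b)) =
            (rest.map Prod.fst).filter (fun b => !(d.contains b)) := by
          apply List.filter_congr
          intro x hx
          have hxb : x ≠ p.1 := fun he => hnb (he ▸ hx)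
          simp [PySem.Dict.contains_modify, hxb]
        rw [hkm, hfil]
        simp [h]
      · rw [if_neg h, ih hnr]
        have hb : d.contains p.1 = false := by simpa using h
        have hkeys : (d.insert p.1 p.2).keys = d.keys ++ [p.1] :=
          PySem.Dict.keys_insert_of_not_contains _ _ hb
        have hfil : (rest.map Prod.fst).filter (fun x => !((d.insert p.1 p.2).contains x)) =
            (rest.map Prod.fst).filter (fun x => !(d.contains x)) := by
          apply List.filter_congr
          intro x hx
          have hxb : x ≠ p.1 := fun he => hnb (he ▸ hx)
          simp [PySem.Dict.contains_insert, hxb]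
        rw [hkeys, hfil]
        simp [hb]

-- ===== VERDICT (by name: the statement is the Claim_ definition above) =====
theorem combine_together_spec : Claim_equal_combine_together := by
  intro d1 d2 _
  show combine_together d1 d2 = combine_together_alt d1 d2
  simp only [combine_together, combine_together_alt]
  set D1 : PySem.Dict String Int := PySem.Dict.ofList d1 with hD1
  set D2 : PySem.Dict String Int := PySem.Dict.ofList d2 with hD2
  have hn1 : D1.keys.Nodup := PySem.Dict.nodup_keys_ofList d1
  have hn2 : D2.keys.Nodup := PySem.Dict.nodup_keys_ofList d2
  have hmap : D1.items.map Prod.fst = D1.keys := rfl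
  have hmk : PySem.Dict.mk D1.items = D1 := rfl
  set p1 := D2.keys.foldl (fun d i => if D1.contains i then d.modify i 0 (· + D1.getD i 0) else d) D2 with hp1
  set p2 := D1.keys.foldl (fun d b => if d.contains b then d else d.insert b (D1.getD b 0)) p1 with hp2
  set rB := D1.items.foldl
    (fun d p => if d.contains p.1 then d.modify p.1 0 (· + p.2) else d.insert p.1 p.2) D2 with hrB
  -- keys of the intermediate and final dicts
  have hk1 : p1.keys = D2.keys := by
    rw [hp1]; exact keys_loop1 _ _ _ D2 (fun i hi => hi)
  have hcont1 : ∀ x, p1.contains x = D2.contains x := by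
    intro x
    rw [PySem.Dict.contains_eq_decide_mem_keys, PySem.Dict.contains_eq_decide_mem_keys, hk1]
  have hkA : p2.keys = D2.keys ++ D1.keys.filter (fun b => !(D2.contains b)) := by
    rw [hp2, keys_loop2 _ _ hn1, hk1]
    congr 1
    apply List.filter_congr
    intro x _
    rw [hcont1]
  have hkB : rB.keys = D2.keys ++ D1.keys.filter (fun b => !(D2.contains b)) := by
    rw [hrB, keys_loopB _ (by rw [hmap]; exact hn1), hmap]
  have hnodup : (D2.keys ++ D1.keys.filter (fun b => !(D2.contains b))).Nodup := by
    refine List.Nodup.append hn2 (hn1.filter _) ?_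
    intro x hx1 hx2
    have := List.of_mem_filter hx2
    rw [PySem.Dict.contains_eq_decide_mem_keys] at this
    simp at this
    exact this hx1
  -- pointwise values
  have hg1 : ∀ k, p1.getD k 0 =
      if k ∈ D2.keys ∧ D1.contains k = true then D2.getD k 0 + D1.getD k 0 else D2.getD k 0 := by
    intro k
    rw [hp1]
    exact getD_loop1 (fun i => D1.contains i) (fun i x => x + D1.getD i 0) D2.keys k hn2 D2
  have hgeq : ∀ k, p2.getD k 0 = rB.getD k 0 := by
    intro k
    rw [hp2, getD_loop2 _ _ _ hn1, hrB,
        getD_loopB _ _ (by rw [hmap]; exact hn1), hmk, hcont1, hg1]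
    by_cases h1 : k ∈ D1.keys <;> by_cases h2 : k ∈ D2.keys
    · -- in both: first loop added, second loop skipped
      have hc1 : D1.contains k = true := by
        rw [PySem.Dict.contains_eq_decide_mem_keys]; simpa using h1
      have hc2 : D2.contains k = true := by
        rw [PySem.Dict.contains_eq_decide_mem_keys]; simpa using h2
      simp [h1, h2, hc1, hc2]
    · -- only in d1: second loop inserts d1's value, B adds it to 0
      have hc2 : D2.contains k = false := by
        rw [PySem.Dict.contains_eq_decide_mem_keys]; simpa using h2
      rw [PySem.Dict.getD_of_not_contains _ _ hc2]
      simp [h1, hc2]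
    · -- only in d2: untouched on both sides
      have hc1 : D1.contains k = false := by
        rw [PySem.Dict.contains_eq_decide_mem_keys]; simpa using h1
      rw [PySem.Dict.getD_of_not_contains _ _ hc1]
      simp [h1, hc1]
    · -- in neither
      have hc1 : D1.contains k = false := by
        rw [PySem.Dict.contains_eq_decide_mem_keys]; simpa using h1
      rw [PySem.Dict.getD_of_not_contains _ _ hc1]
      simp [h1]
  -- items = keys paired with values, on both sides
  calc p2.items
      = p2.keys.map (fun k => (k, p2.getD k 0)) :=
        PySem.Dict.items_eq_map_keys p2 (hkA ▸ hnodup) 0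
    _ = rB.keys.map (fun k => (k, rB.getD k 0)) := by
        rw [hkA, ← hkB]
        exact List.map_congr_left (fun x _ => by rw [hgeq])
    _ = rB.items := (PySem.Dict.items_eq_map_keys rB (hkB ▸ hnodup) 0).symm
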